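-- pv_equiv track=rewrite | github.com/ahyun39/CodingTest | 프로그래머스/3/64062. 징검다리 건너기/징검다리 건너기.py | solution
-- ===== SOURCE A (Python) =====
-- def solution(stones, k):
--     answer = 0
--     left, right = 1, max(stones)
--
--     while left <= right:
--         mid = (left + right) // 2
--         unusable_cnt = 0
--         can_cross = True
--
--         for stone in stones:
--             if stone - mid < 0:
--                 unusable_cnt += 1
--             else:
--                 unusable_cnt = 0
--             if unusable_cnt >= k:
--                 can_cross = False
--                 break
--         if can_cross:
--             answer = mid
--             left = mid + 1
--         else:
--             right = mid - 1
--     return answer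
-- ===== SOURCE B (Python) =====
-- def solution(stones, k):
--     # answer = min over all k-length windows of the window maximum, clamped at 0
--     # (max(stones) when fewer than k stones). Window maxima via the
--     # block trick: split into blocks of size k; pre[i] = max of stones from the
--     # start of i's block up to i, suf[i] = max of stones from i to the end of
--     # i's block; the max of window [i, i+k-1] is max(suf[i], pre[i+k-1]).
--     if k <= 0:
--         return 0  # no tolerance for weak stones: nobody can cross
--     n = len(stones)
--     if k > n:
--         m = max(stones)
--     else:
--         pre = []
--         for i in range(n):
--             pre.append(stones[i] if i % k == 0 else max(pre[i - 1], stones[i]))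
--         suf = [0] * n
--         for i in range(n - 1, -1, -1):
--             suf[i] = stones[i] if i % k == k - 1 or i == n - 1 else max(suf[i + 1], stones[i])
--         m = min(max(suf[i], pre[i + k - 1]) for i in range(n - k + 1))
--     return m if m > 0 else 0
-- ===== Notes on version B (the rewrite author's own statement) =====
-- stated objective: alternative
-- what changed: Replaced A's binary search on the answer (rescanning all stones per probe) by a direct computation: the answer is the minimum over all k-length windows of the window maximum (clamped at 0; max(stones) when fewer than k stones, 0 when k <= 0), with all window maxima obtained in one pass from per-block prefix and suffix maxima.
import Mathlib
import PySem

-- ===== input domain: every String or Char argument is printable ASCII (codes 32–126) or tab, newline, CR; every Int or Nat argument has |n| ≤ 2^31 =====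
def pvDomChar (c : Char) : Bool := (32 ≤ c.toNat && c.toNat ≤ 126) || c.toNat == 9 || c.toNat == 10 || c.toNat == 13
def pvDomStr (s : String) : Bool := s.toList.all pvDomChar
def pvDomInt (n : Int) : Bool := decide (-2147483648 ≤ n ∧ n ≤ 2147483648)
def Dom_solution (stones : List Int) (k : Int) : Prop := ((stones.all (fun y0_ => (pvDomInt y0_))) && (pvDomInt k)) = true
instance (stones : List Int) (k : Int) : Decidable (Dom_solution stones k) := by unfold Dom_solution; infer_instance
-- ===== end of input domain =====

-- B replaces A's binary search on the answer by the closed form "min over k-windows of the window maximum, clamped at 0" (alternative algorithm).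

-- ===== PORT A =====
-- the inner for-loop of A (with its break); cnt is unusable_cnt
def crossLoopA (k mid : Int) : List Int → Int → Bool
  | [], _ => true
  | s :: rest, cnt =>
      let cnt' := if s - mid < 0 then cnt + 1 else 0
      if cnt' ≥ k then false else crossLoopA k mid rest cnt'

-- the while-loop of A (binary search on the answer)
def bsearchA (stones : List Int) (k : Int) (left right answer : Int) : Int :=
  if h : left ≤ right then
    let mid := PySem.Int.floordiv (left + right) 2
    if crossLoopA k mid stones 0 then bsearchA stones k (mid + 1) right mid
    else bsearchA stones k left (mid - 1) answer
  else answer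
termination_by (right - left + 1).toNat
decreasing_by
  · have := PySem.Int.floordiv_two_mid_bounds h; omega
  · have := PySem.Int.floordiv_two_mid_bounds h; omega

-- max(stones) raises on [], which Pre_ excludes; there the port uses 0
def solution (stones : List Int) (k : Int) : Int :=
  bsearchA stones k 1 ((PySem.List.max? stones (fun y => y)).getD 0) 0

-- ===== PORT B =====
-- Source B: window maxima via the block trick (pre = in-block prefix maxima, suf = in-block
-- suffix maxima), m = min over i of max(suf[i], pre[i+k-1]); clamp at 0; max(stones) if k > n.
-- max()/min() of an empty sequence raise in Python (outside Pre_); the port uses .getD 0 there.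

-- the first loop of Source B: pre.append(stones[i] if i % k == 0 else max(pre[i-1], stones[i]))
def buildPre (stones : List Int) (k : Int) : List Int :=
  (PySem.List.pyRange 0 (stones.length : Int) 1).foldl
    (fun pre i =>
      pre ++ [if PySem.Int.mod i k = 0 then PySem.List.pyGetD stones i 0
              else max (PySem.List.pyGetD pre (i - 1) 0) (PySem.List.pyGetD stones i 0)]) []

-- the second loop of Source B: suf[i] = ... for i in range(n-1, -1, -1); [0]*n is the replicate.
-- (suf[i] = v is List.set; i ≥ 0 throughout the loop, so i.toNat is the exact Python index)
def buildSuf (stones : List Int) (k : Int) : List Int :=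
  (PySem.List.pyRange ((stones.length : Int) - 1) (-1) (-1)).foldl
    (fun suf i =>
      suf.set i.toNat
        (if PySem.Int.mod i k = k - 1 ∨ i = (stones.length : Int) - 1
         then PySem.List.pyGetD stones i 0
         else max (PySem.List.pyGetD suf (i + 1) 0) (PySem.List.pyGetD stones i 0)))
    (List.replicate stones.length 0)

def solution_alt (stones : List Int) (k : Int) : Int :=
  if k ≤ 0 then 0
  else
  let n : Int := stones.length
  let m : Int :=
    if k > n then (PySem.List.max? stones (fun y => y)).getD 0
    else
      let pre := buildPre stones k
      let suf := buildSuf stones k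
      (PySem.List.min?
        ((PySem.List.pyRange 0 (n - k + 1) 1).map
          (fun i => max (PySem.List.pyGetD suf i 0) (PySem.List.pyGetD pre (i + k - 1) 0)))
        (fun y => y)).getD 0
  if m > 0 then m else 0

-- ===== PRECONDITION & SPEC =====
-- Pre_ excludes stones = [], on which A raises ValueError (max of an empty list).
def Pre_solution (stones : List Int) (_k : Int) : Prop := stones ≠ []
instance (stones : List Int) (k : Int) : Decidable (Pre_solution stones k) := by unfold Pre_solution; infer_instance

def pvWitness_solution : List Int × Int := ([2, 4, 1, 3], 2)

def Spec_solution (stones : List Int) (k : Int) (out : Int) : Prop := out = solution_alt stones k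
instance (stones : List Int) (k : Int) (out : Int) : Decidable (Spec_solution stones k out) := by unfold Spec_solution; infer_instance

-- ===== CLAIM (what is proved, stated in full; the proofs are below) =====
def Claim_equal_solution : Prop := ∀ (stones : List Int) (k : Int), Dom_solution stones k → Pre_solution stones k → Spec_solution stones k (solution stones k)

-- ===== LEMMAS AND PROOFS =====

-- length of the leading run of stones below mid
def leadLen (mid : Int) (l : List Int) : Nat := (l.takeWhile (fun x => decide (x < mid))).length

-- "some k consecutive stones are all below mid" (a blocking window)
def BadW (mid : Int) (K : Nat) (l : List Int) : Prop :=
  ∃ i : Nat, i + K ≤ l.length ∧ ∀ x ∈ (l.drop i).take K, x < mid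

-- the maximum of the window of length K starting at j (0 only for an empty window)
def wmax (stones : List Int) (K j : Nat) : Int :=
  (PySem.List.max? ((stones.drop j).take K) (fun y => y)).getD 0

-- the list of window maxima, and their minimum (B's m in the k ≤ n case)
def winList (stones : List Int) (K : Nat) : List Int :=
  (List.range (stones.length - K + 1)).map (fun j => wmax stones K j)

def theta (stones : List Int) (K : Nat) : Int :=
  (PySem.List.min? (winList stones K) (fun y => y)).getD 0

lemma takeWhile_len_ge_iff {α : Type} (p : α → Bool) (l : List α) (K : Nat) :
    K ≤ (l.takeWhile p).length ↔ K ≤ l.length ∧ ∀ x ∈ l.take K, p x = true := by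
  induction l generalizing K with
  | nil => simp
  | cons s t ih =>
    cases K with
    | zero => simp
    | succ K =>
      cases hp : p s with
      | true =>
        simp only [List.takeWhile_cons, hp, if_true, List.length_cons, Nat.succ_le_succ_iff,
          List.take_succ_cons, List.mem_cons, ih]
        constructor
        · rintro ⟨h1, h2⟩; exact ⟨h1, by rintro x (rfl | hx); exact hp; exact h2 x hx⟩
        · rintro ⟨h1, h2⟩; exact ⟨h1, fun x hx => h2 x (Or.inr hx)⟩
      | false =>
        simp only [List.takeWhile_cons, hp, Bool.false_eq_true, if_false, List.length_nil,
          List.take_succ_cons]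
        constructor
        · intro hh; exact absurd hh (by omega)
        · rintro ⟨_, h2⟩
          have := h2 s (List.mem_cons_self ..)
          simp [hp] at this

lemma lead_ge_bad {mid : Int} {K : Nat} {l : List Int} (h : K ≤ leadLen mid l) :
    BadW mid K l := by
  rw [leadLen, takeWhile_len_ge_iff] at h
  refine ⟨0, by simpa using h.1, ?_⟩
  intro x hx
  have := h.2 x (by simpa using hx)
  simpa using this

lemma bad_cons {mid : Int} {K : Nat} {s : Int} {rest : List Int} :
    BadW mid K (s :: rest) ↔ K ≤ leadLen mid (s :: rest) ∨ BadW mid K rest := by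
  constructor
  · rintro ⟨i, hb, hall⟩
    cases i with
    | zero =>
      left
      rw [leadLen, takeWhile_len_ge_iff]
      refine ⟨by simpa using hb, ?_⟩
      intro x hx
      simpa using hall x (by simpa using hx)
    | succ i =>
      right
      exact ⟨i, by simp at hb ⊢; omega, by simpa using hall⟩
  · rintro (h | ⟨i, hb, hall⟩)
    · exact lead_ge_bad h
    · exact ⟨i + 1, by simp; omega, by simpa using hall⟩

lemma crossLoopA_false_iff (K : Nat) (hK : 1 ≤ K) (mid : Int) (l : List Int) (cnt : Int)
    (hc0 : 0 ≤ cnt) (hck : cnt < (K : Int)) :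
    (crossLoopA (K : Int) mid l cnt = false ↔
      BadW mid K l ∨ (K : Int) ≤ cnt + (leadLen mid l : Int)) := by
  induction l generalizing cnt with
  | nil =>
    simp only [crossLoopA, leadLen, List.takeWhile_nil, List.length_nil, Nat.cast_zero, add_zero]
    constructor
    · intro h; cases h
    · rintro (⟨i, hb, _⟩ | h)
      · simp at hb; omega
      · omega
  | cons s rest ih =>
    by_cases hs : s - mid < 0
    · have hlead : leadLen mid (s :: rest) = leadLen mid rest + 1 := by
        simp [leadLen, show s < mid by omega]
      by_cases h1 : (K : Int) ≤ cnt + 1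
      · simp only [crossLoopA, if_pos hs, if_pos h1]
        constructor
        · intro _; right; rw [hlead]; omega
        · intro _; trivial
      · simp only [crossLoopA, if_pos hs, if_neg h1]
        rw [ih (cnt + 1) (by omega) (by omega), bad_cons, hlead]
        constructor
        · rintro (hb | hh)
          · exact Or.inl (Or.inr hb)
          · right; omega
        · rintro ((hh | hb) | hh)
          · right; omega
          · exact Or.inl hb
          · right; omega
    · have hlead : leadLen mid (s :: rest) = 0 := by
        simp [leadLen, show ¬ s < mid by omega]
      simp only [crossLoopA, if_neg hs, if_neg (show ¬ (0 : Int) ≥ (K : Int) by omega)]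
      rw [ih 0 le_rfl (by exact_mod_cast hK), bad_cons, hlead]
      constructor
      · rintro (hb | hh)
        · exact Or.inl (Or.inr hb)
        · exact Or.inl (Or.inr (lead_ge_bad (by omega)))
      · rintro ((hh | hb) | hh)
        · exact absurd hh (by omega)
        · exact Or.inl hb
        · exact absurd hh (by omega)

lemma crossLoopA_true_iff (K : Nat) (hK : 1 ≤ K) (mid : Int) (l : List Int) :
    (crossLoopA (K : Int) mid l 0 = true ↔ ¬ BadW mid K l) := by
  have h := crossLoopA_false_iff K hK mid l 0 le_rfl (by exact_mod_cast hK)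
  constructor
  · intro ht hb
    have : crossLoopA (K : Int) mid l 0 = false := h.mpr (Or.inl hb)
    rw [ht] at this; cases this
  · intro hnb
    cases hc : crossLoopA (K : Int) mid l 0 with
    | true => rfl
    | false =>
      rcases h.mp hc with hb | hl
      · exact absurd hb hnb
      · exact absurd (lead_ge_bad (by exact_mod_cast (by simpa using hl : (K : Int) ≤ (leadLen mid l : Int)))) hnb

lemma wmax_spec {stones : List Int} {K j : Nat} (_hK : 1 ≤ K) (hj : j + K ≤ stones.length) :
    wmax stones K j ∈ (stones.drop j).take K ∧ ∀ x ∈ (stones.drop j).take K, x ≤ wmax stones K j := by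
  have hne : (stones.drop j).take K ≠ [] := by
    have hl : ((stones.drop j).take K).length = K := by
      simp [List.length_take, List.length_drop]; omega
    intro h; rw [h] at hl; simp at hl; omega
  cases hm : PySem.List.max? ((stones.drop j).take K) (fun y => y) with
  | none => exact absurd ((PySem.List.max?_eq_none_iff _ _).mp hm) hne
  | some w =>
    refine ⟨?_, ?_⟩
    · rw [wmax, hm]; exact PySem.List.max?_mem hm
    · intro x hx; rw [wmax, hm]
      exact PySem.List.max?_isMax hm x hx

lemma theta_spec {stones : List Int} {K : Nat} (_hK : 1 ≤ K) (hKL : K ≤ stones.length) :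
    (∃ j, j + K ≤ stones.length ∧ theta stones K = wmax stones K j) ∧
      (∀ j, j + K ≤ stones.length → theta stones K ≤ wmax stones K j) := by
  have hne : winList stones K ≠ [] := by
    rw [winList]
    simp [List.range_eq_nil]
  cases hm : PySem.List.min? (winList stones K) (fun y => y) with
  | none => exact absurd ((PySem.List.min?_eq_none_iff _ _).mp hm) hne
  | some m =>
    have hth : theta stones K = m := by rw [theta, hm]; rfl
    constructor
    · have := PySem.List.min?_mem hm
      rw [winList, List.mem_map] at this
      obtain ⟨j, hj, hjm⟩ := this
      rw [List.mem_range] at hj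
      exact ⟨j, by omega, by rw [hth, hjm]⟩
    · intro j hj
      have hmem : wmax stones K j ∈ winList stones K := by
        rw [winList, List.mem_map]
        exact ⟨j, List.mem_range.mpr (by omega), rfl⟩
      rw [hth]
      exact PySem.List.min?_isMin hm _ hmem

lemma bad_iff_theta {stones : List Int} {K : Nat} (hK : 1 ≤ K) (hKL : K ≤ stones.length)
    (mid : Int) : BadW mid K stones ↔ theta stones K < mid := by
  obtain ⟨⟨j0, hj0, hth⟩, hlb⟩ := theta_spec hK hKL (stones := stones)
  constructor
  · rintro ⟨i, hi, hall⟩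
    have hw := wmax_spec hK hi (stones := stones)
    calc theta stones K ≤ wmax stones K i := hlb i hi
      _ < mid := hall _ hw.1
  · intro hth'
    have hw := wmax_spec hK hj0 (stones := stones)
    exact ⟨j0, hj0, fun x hx => lt_of_le_of_lt (hw.2 x hx) (by rw [← hth]; exact hth')⟩

lemma theta_le_max {stones : List Int} {K : Nat} (hK : 1 ≤ K) (hKL : K ≤ stones.length) :
    theta stones K ≤ (PySem.List.max? stones (fun y => y)).getD 0 := by
  obtain ⟨⟨j0, hj0, hth⟩, _⟩ := theta_spec hK hKL (stones := stones)
  have hw := wmax_spec hK hj0 (stones := stones)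
  have hmem : wmax stones K j0 ∈ stones :=
    List.mem_of_mem_drop (List.mem_of_mem_take hw.1)
  cases stones with
  | nil => simp at hKL; omega
  | cons h t =>
    rw [PySem.List.max?_id_cons, Option.getD_some, hth]
    exact PySem.List.max?_isMax (PySem.List.max?_id_cons h t) _ hmem

-- the mathematical in-block prefix-maximum recurrence (pre[i] of Source B)
def Pfun (g : Nat → Int) (K : Nat) : Nat → Int
  | 0 => g 0
  | i + 1 => if (i + 1) % K = 0 then g (i + 1) else max (Pfun g K i) (g (i + 1))

-- the mathematical in-block suffix-maximum recurrence (suf[i] of Source B)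
def Sfun (g : Nat → Int) (K L : Nat) (i : Nat) : Int :=
  if i % K = K - 1 then g i
  else if L ≤ i + 1 then g i
  else max (Sfun g K L (i + 1)) (g i)
termination_by L - i
decreasing_by omega

lemma foldl_max_max (c b : Int) (t : List Int) :
    t.foldl max (max c b) = max c (t.foldl max b) := by
  induction t generalizing b with
  | nil => rfl
  | cons x t ih => simp only [List.foldl_cons, max_assoc, ih]

lemma wmax_one {stones : List Int} {a : Nat} (ha : a < stones.length) :
    wmax stones 1 a = stones.getD a 0 := by
  have hd : stones.drop a = stones[a] :: stones.drop (a + 1) := List.drop_eq_getElem_cons ha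
  rw [wmax, hd, List.take_succ_cons, List.take_zero, PySem.List.max?_id_cons]
  simp [List.getD, List.getElem?_eq_getElem ha]

lemma wmax_split {stones : List Int} {a m n : Nat} (hm : 1 ≤ m) (hn : 1 ≤ n)
    (h : a + m + n ≤ stones.length) :
    wmax stones (m + n) a = max (wmax stones m a) (wmax stones n (a + m)) := by
  have hseg : (stones.drop a).take (m + n) =
      (stones.drop a).take m ++ (stones.drop (a + m)).take n := by
    rw [List.take_add, List.drop_drop]
  obtain ⟨x, t1, h1⟩ : ∃ x t1, (stones.drop a).take m = x :: t1 := by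
    cases he : (stones.drop a).take m with
    | nil =>
      exfalso
      have := congrArg List.length he
      simp [List.length_take, List.length_drop] at this
      omega
    | cons x t1 => exact ⟨x, t1, rfl⟩
  obtain ⟨y, t2, h2⟩ : ∃ y t2, (stones.drop (a + m)).take n = y :: t2 := by
    cases he : (stones.drop (a + m)).take n with
    | nil =>
      exfalso
      have := congrArg List.length he
      simp [List.length_take, List.length_drop] at this
      omega
    | cons y t2 => exact ⟨y, t2, rfl⟩
  rw [wmax, wmax, wmax, hseg, h1, h2, List.cons_append, PySem.List.max?_id_cons,
    PySem.List.max?_id_cons, PySem.List.max?_id_cons]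
  simp only [Option.getD_some, List.foldl_append, List.foldl_cons]
  rw [foldl_max_max]

lemma succ_mod_lt {i K : Nat} (h : i % K + 1 < K) : (i + 1) % K = i % K + 1 := by
  have hdm := Nat.div_add_mod i K
  have h2 : i + 1 = i % K + 1 + K * (i / K) := by omega
  rw [h2, Nat.add_mul_mod_self_left, Nat.mod_eq_of_lt h]

lemma succ_mod_of_ne {i K : Nat} (hK : 1 ≤ K) (hc : (i + 1) % K ≠ 0) :
    (i + 1) % K = i % K + 1 := by
  have hlt : i % K < K := Nat.mod_lt _ (by omega)
  by_cases he : i % K + 1 = K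
  · exfalso
    apply hc
    have hdm := Nat.div_add_mod i K
    have hmul : K * (i / K + 1) = K * (i / K) + K := by ring
    have h2 : i + 1 = K * (i / K + 1) := by omega
    rw [h2, Nat.mul_mod_right]
  · exact succ_mod_lt (by omega)

lemma P_spec {stones : List Int} {K : Nat} (hK : 1 ≤ K) :
    ∀ i, i < stones.length →
      Pfun (fun j => stones.getD j 0) K i = wmax stones (i % K + 1) (i - i % K) := by
  intro i
  induction i with
  | zero =>
    intro h0
    rw [Pfun, Nat.zero_mod, Nat.sub_zero, wmax_one h0]
  | succ i ih =>
    intro hi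
    rw [Pfun]
    by_cases hc : (i + 1) % K = 0
    · rw [if_pos hc, hc, Nat.sub_zero, wmax_one hi]
    · rw [if_neg hc, succ_mod_of_ne hK hc]
      have hsub : i + 1 - (i % K + 1) = i - i % K := by omega
      have hmle : i % K ≤ i := Nat.mod_le i K
      rw [hsub, show i % K + 1 + 1 = (i % K + 1) + 1 from rfl,
        wmax_split (by omega) (by omega) (by omega),
        ih (by omega), show i - i % K + (i % K + 1) = i + 1 by omega,
        wmax_one hi]

lemma S_spec {stones : List Int} {K : Nat} (hK : 1 ≤ K) :
    ∀ d i, stones.length - i ≤ d → i < stones.length →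
      Sfun (fun j => stones.getD j 0) K stones.length i =
        wmax stones (min (K - i % K) (stones.length - i)) i := by
  intro d
  induction d with
  | zero => intro i h1 h2; omega
  | succ d ih =>
    intro i h1 h2
    have hlt : i % K < K := Nat.mod_lt _ (by omega)
    rw [Sfun]
    by_cases hc1 : i % K = K - 1
    · rw [if_pos hc1, hc1, show K - (K - 1) = 1 by omega,
        show min 1 (stones.length - i) = 1 by omega, wmax_one h2]
    · rw [if_neg hc1]
      by_cases hc2 : stones.length ≤ i + 1
      · rw [if_pos hc2, show min (K - i % K) (stones.length - i) = 1 by omega, wmax_one h2]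
      · rw [if_neg hc2]
        have hmod : (i + 1) % K = i % K + 1 := succ_mod_lt (by omega)
        have hrec := ih (i + 1) (by omega) (by omega)
        rw [hmod] at hrec
        have hn' : min (K - i % K) (stones.length - i) =
            1 + min (K - (i % K + 1)) (stones.length - (i + 1)) := by omega
        rw [hrec, hn', wmax_split (by omega) (by omega) (by omega), wmax_one h2,
          max_comm]

-- the block identity: the window max is max(suf[j], pre[j+k-1])
lemma window_id {stones : List Int} {K j : Nat} (hK : 1 ≤ K) (hj : j + K ≤ stones.length) :
    max (Sfun (fun j => stones.getD j 0) K stones.length j)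
        (Pfun (fun j => stones.getD j 0) K (j + K - 1)) = wmax stones K j := by
  have hr : j % K < K := Nat.mod_lt _ (by omega)
  have hdm := Nat.div_add_mod j K
  have hS := S_spec (stones := stones) (K := K) hK (stones.length - j) j le_rfl (by omega)
  have hP := P_spec (stones := stones) (K := K) hK (j + K - 1) (by omega)
  by_cases h0 : j % K = 0
  · have hm : (j + K - 1) % K = K - 1 := by
      have : j + K - 1 = K * (j / K) + (K - 1) := by omega
      rw [this, Nat.mul_add_mod, Nat.mod_eq_of_lt (by omega)]
    rw [hm] at hP
    have hstart : j + K - 1 - (K - 1) = j := by omega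
    rw [hstart, show K - 1 + 1 = K by omega] at hP
    rw [h0, Nat.sub_zero, show min K (stones.length - j) = K by omega] at hS
    rw [hS, hP, max_self]
  · have hm : (j + K - 1) % K = j % K - 1 := by
      have hmul : K * (j / K + 1) = K * (j / K) + K := by ring
      have : j + K - 1 = K * (j / K + 1) + (j % K - 1) := by omega
      rw [this, Nat.mul_add_mod, Nat.mod_eq_of_lt (by omega)]
    rw [hm] at hP
    have hstart : j + K - 1 - (j % K - 1) = j + (K - j % K) := by omega
    rw [hstart, show j % K - 1 + 1 = j % K by omega] at hP
    rw [show min (K - j % K) (stones.length - j) = K - j % K by omega] at hS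
    rw [hS, hP, ← wmax_split (by omega) (by omega) (by omega),
      show K - j % K + j % K = K by omega]

-- the first loop of Source B builds the list of Pfun values
lemma pre_loop {stones : List Int} {K : Nat} (_hK : 1 ≤ K) :
    ∀ n, n ≤ stones.length →
      ((PySem.List.pyRange 0 (n : Int) 1).foldl
        (fun pre i =>
          pre ++ [if PySem.Int.mod i (K : Int) = 0 then PySem.List.pyGetD stones i 0
                  else max (PySem.List.pyGetD pre (i - 1) 0) (PySem.List.pyGetD stones i 0)]) [])
      = (List.range n).map (Pfun (fun j => stones.getD j 0) K) := by
  intro n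
  induction n with
  | zero => intro _; rfl
  | succ n ih =>
    intro hn
    rw [show ((n + 1 : Nat) : Int) = (n : Int) + 1 by push_cast; ring,
      PySem.List.pyRange_one_succ_right (by omega), List.foldl_append, ih (by omega),
      List.foldl_cons, List.foldl_nil, List.range_succ, List.map_append]
    congr 1
    have hmod : PySem.Int.mod (n : Int) (K : Int) = ((n % K : Nat) : Int) :=
      PySem.Int.mod_natCast n K
    by_cases hc : n % K = 0
    · rw [hmod, if_pos (by exact_mod_cast congrArg (fun x : Nat => (x : Int)) hc)]
      rw [PySem.List.pyGetD_natCast]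
      cases n with
      | zero => rfl
      | succ i => simp [Pfun, hc]
    · have hn1 : 1 ≤ n := by
        rcases Nat.eq_zero_or_pos n with h | h
        · exact absurd (h ▸ Nat.zero_mod K) hc
        · exact h
      rw [hmod, if_neg (fun h0 => hc (by exact_mod_cast h0))]
      rw [show (n : Int) - 1 = ((n - 1 : Nat) : Int) by omega,
        PySem.List.pyGetD_natCast, PySem.List.pyGetD_natCast,
        PySem.List.getD_map_range _ _ _ _ (by omega)]
      cases n with
      | zero => omega
      | succ i => simp [Pfun, hc]

-- the second loop of Source B fills in the Sfun values, from the right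
lemma suf_loop {stones : List Int} {K : Nat} (hK : 1 ≤ K) :
    ∀ i, i ≤ stones.length → ∀ acc : List Int, acc.length = stones.length →
      (∀ j, j < stones.length → i ≤ j →
        acc.getD j 0 = Sfun (fun j => stones.getD j 0) K stones.length j) →
      ((PySem.List.pyRange ((i : Int) - 1) (-1) (-1)).foldl
        (fun suf i =>
          suf.set i.toNat
            (if PySem.Int.mod i (K : Int) = (K : Int) - 1 ∨ i = (stones.length : Int) - 1
             then PySem.List.pyGetD stones i 0
             else max (PySem.List.pyGetD suf (i + 1) 0) (PySem.List.pyGetD stones i 0)))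
        acc)
      = (List.range stones.length).map (Sfun (fun j => stones.getD j 0) K stones.length) := by
  intro i
  induction i with
  | zero =>
    intro _ acc hlen hacc
    rw [show ((0 : Nat) : Int) - 1 = -1 by omega, PySem.List.pyRange_neg_one_eq_nil (by omega),
      List.foldl_nil]
    apply List.ext_getElem
    · simp [hlen]
    · intro j hj1 hj2
      have := hacc j (by omega) (by omega)
      rw [List.getD_eq_getElem acc 0 (by omega)] at this
      rw [this]
      simp
  | succ i ih =>
    intro hiL acc hlen hacc
    have hiL' : i < stones.length := by omega
    rw [show ((i + 1 : Nat) : Int) - 1 = (i : Int) by omega,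
      PySem.List.pyRange_neg_one_cons (by omega), List.foldl_cons]
    set g := fun j => stones.getD j 0 with hg
    set v := (if PySem.Int.mod (i : Int) (K : Int) = (K : Int) - 1 ∨ (i : Int) = (stones.length : Int) - 1
              then PySem.List.pyGetD stones (i : Int) 0
              else max (PySem.List.pyGetD acc ((i : Int) + 1) 0) (PySem.List.pyGetD stones (i : Int) 0)) with hv
    have hveq : v = Sfun g K stones.length i := by
      rw [hv, PySem.Int.mod_natCast]
      conv_rhs => rw [Sfun]
      by_cases hc1 : i % K = K - 1
      · rw [if_pos (Or.inl (by exact_mod_cast congrArg (fun x : Nat => (x : Int)) hc1)),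
          PySem.List.pyGetD_natCast, if_pos hc1]
      · by_cases hc2 : stones.length ≤ i + 1
        · rw [if_pos (Or.inr (by omega)), PySem.List.pyGetD_natCast, if_neg hc1, if_pos hc2]
        · rw [if_neg (by
            rintro (h | h)
            · apply hc1
              have h' : ((i % K : Nat) : Int) = ((K - 1 : Nat) : Int) := by omega
              exact_mod_cast h'
            · omega)]
          rw [show (i : Int) + 1 = ((i + 1 : Nat) : Int) by omega,
            PySem.List.pyGetD_natCast, PySem.List.pyGetD_natCast,
            hacc (i + 1) (by omega) (by omega), if_neg hc1, if_neg hc2]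
    rw [show ((i : Int)).toNat = i from Int.toNat_natCast i]
    apply ih (by omega) (acc.set i v) (by simp [hlen])
    intro j hjL hij
    by_cases hji : j = i
    · subst hji
      rw [List.getD_eq_getElem _ 0 (by simp [hlen]; omega), List.getElem_set_self (by rw [List.length_set, hlen]; omega), hveq]
    · rw [List.getD_eq_getElem _ 0 (by simp [hlen]; omega), List.getElem_set_ne (by omega) (hj := by rw [List.length_set, hlen]; omega),
        ← List.getD_eq_getElem acc 0 (by omega)]
      exact hacc j hjL (by omega)

lemma buildPre_eq {stones : List Int} {K : Nat} (hK : 1 ≤ K) :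
    buildPre stones (K : Int) = (List.range stones.length).map (Pfun (fun j => stones.getD j 0) K) := by
  rw [buildPre]
  exact pre_loop hK stones.length le_rfl

lemma buildSuf_eq {stones : List Int} {K : Nat} (hK : 1 ≤ K) :
    buildSuf stones (K : Int) = (List.range stones.length).map (Sfun (fun j => stones.getD j 0) K stones.length) := by
  rw [buildSuf]
  exact suf_loop hK stones.length le_rfl (List.replicate stones.length 0)
    (by simp) (fun j hjL hij => by omega)

-- B's port in the k ≤ n case computes exactly theta, clamped at 0
lemma alt_eq_theta (stones : List Int) (K : Nat) (hK : 1 ≤ K) (hKL : K ≤ stones.length) :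
    solution_alt stones (K : Int) =
      if theta stones K > 0 then theta stones K else 0 := by
  rw [solution_alt, if_neg (by omega : ¬ (K : Int) ≤ 0)]
  have hkn : ¬ ((K : Int) > (stones.length : Int)) := by omega
  simp only [if_neg hkn]
  rw [buildPre_eq hK, buildSuf_eq hK]
  have hr : (stones.length : Int) - (K : Int) + 1 = ((stones.length - K + 1 : Nat) : Int) := by
    omega
  rw [hr, PySem.List.pyRange_zero_natCast, List.map_map]
  have hmap : ((List.range (stones.length - K + 1)).map
        ((fun i => max (PySem.List.pyGetD ((List.range stones.length).map (Sfun (fun j => stones.getD j 0) K stones.length)) i 0)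
                       (PySem.List.pyGetD ((List.range stones.length).map (Pfun (fun j => stones.getD j 0) K)) (i + (K : Int) - 1) 0))
          ∘ (fun (k : Nat) => (k : Int))))
      = winList stones K := by
    rw [winList]
    apply List.map_congr_left
    intro j hj
    rw [List.mem_range] at hj
    have hjK : j + K ≤ stones.length := by omega
    simp only [Function.comp]
    rw [show (j : Int) + (K : Int) - 1 = ((j + K - 1 : Nat) : Int) by omega,
      PySem.List.pyGetD_natCast, PySem.List.pyGetD_natCast,
      PySem.List.getD_map_range _ _ _ _ (by omega), PySem.List.getD_map_range _ _ _ _ (by omega)]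
    exact window_id hK hjK
  rw [hmap]
  rfl

lemma alt_eq_max (stones : List Int) (k : Int) (hk : 1 ≤ k) (hkn : k > (stones.length : Int)) :
    solution_alt stones k =
      if (PySem.List.max? stones (fun y => y)).getD 0 > 0
      then (PySem.List.max? stones (fun y => y)).getD 0 else 0 := by
  rw [solution_alt, if_neg (by omega : ¬ k ≤ 0)]
  simp only [if_pos hkn]

lemma bsearchA_unfold (stones : List Int) (k l r a : Int) (h : l ≤ r) :
    bsearchA stones k l r a =
      if crossLoopA k (PySem.Int.floordiv (l + r) 2) stones 0
      then bsearchA stones k (PySem.Int.floordiv (l + r) 2 + 1) r (PySem.Int.floordiv (l + r) 2)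
      else bsearchA stones k l (PySem.Int.floordiv (l + r) 2 - 1) a := by
  rw [bsearchA, dif_pos h]

-- the binary search, evaluated: with crossLoopA deciding "mid ≤ θ" on [1, M], it computes a clamp
lemma bsearch_eval (stones : List Int) (k θ M : Int)
    (Hc : ∀ x, 1 ≤ x → x ≤ M → crossLoopA k x stones 0 = decide (x ≤ θ)) :
    ∀ (N : Nat) (l r a : Int), (r - l + 1).toNat ≤ N → 1 ≤ l → r ≤ M →
      bsearchA stones k l r a = if r < l then a else if θ < l then a else min θ r := by
  intro N
  induction N with
  | zero =>
    intro l r a hN hl hr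
    have hrl : r < l := by omega
    rw [bsearchA, dif_neg (by omega), if_pos hrl]
  | succ N ih =>
    intro l r a hN hl hr
    by_cases hlr : l ≤ r
    · rw [bsearchA_unfold stones k l r a hlr]
      have hmid := PySem.Int.floordiv_two_mid_bounds hlr
      set mid := PySem.Int.floordiv (l + r) 2 with hmiddef
      have hc := Hc mid (by omega) (by omega)
      by_cases hmθ : mid ≤ θ
      · rw [hc, decide_eq_true hmθ, if_pos rfl,
          ih (mid + 1) r mid (by omega) (by omega) hr]
        split_ifs <;> omega
      · rw [hc, decide_eq_false hmθ]
        simp only [Bool.false_eq_true, if_false]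
        rw [ih l (mid - 1) a (by omega) hl (by omega)]
        split_ifs <;> omega
    · rw [bsearchA, dif_neg hlr, if_pos (by omega)]

-- with k ≤ 0 the break condition fires on the first stone: the scan always fails
lemma crossLoopA_nonpos {k mid s cnt : Int} (rest : List Int) (hk : k ≤ 0) (hc : 0 ≤ cnt) :
    crossLoopA k mid (s :: rest) cnt = false := by
  simp only [crossLoopA]
  rw [if_pos (by split_ifs <;> omega : (if s - mid < 0 then cnt + 1 else 0) ≥ k)]

-- a binary search whose probe always fails returns its initial answer
lemma bsearch_const (stones : List Int) (k : Int)
    (hf : ∀ mid, crossLoopA k mid stones 0 = false) :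
    ∀ (N : Nat) (l r a : Int), (r - l + 1).toNat ≤ N → bsearchA stones k l r a = a := by
  intro N
  induction N with
  | zero =>
    intro l r a hN
    rw [bsearchA, dif_neg (by omega)]
  | succ N ih =>
    intro l r a hN
    by_cases hlr : l ≤ r
    · rw [bsearchA_unfold stones k l r a hlr, hf]
      simp only [Bool.false_eq_true, if_false]
      have hmid := PySem.Int.floordiv_two_mid_bounds hlr
      exact ih l (PySem.Int.floordiv (l + r) 2 - 1) a (by omega)
    · rw [bsearchA, dif_neg hlr]

-- ===== VERDICT (by name: the statement is the Claim_ definition above) =====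
theorem solution_spec : Claim_equal_solution := by
  intro stones k _ hne
  rw [Spec_solution]
  obtain ⟨h, t, rfl⟩ : ∃ h t, stones = h :: t := by
    cases stones with
    | nil => exact absurd rfl hne
    | cons h t => exact ⟨h, t, rfl⟩
  by_cases hk0 : k ≤ 0
  · rw [solution, solution_alt, if_pos hk0,
      bsearch_const (h :: t) k (fun mid => crossLoopA_nonpos t hk0 le_rfl) _ 1 _ 0 le_rfl]
  have hk : 1 ≤ k := by omega
  obtain ⟨K, rfl⟩ : ∃ K : Nat, k = (K : Int) := ⟨k.toNat, by omega⟩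
  have hK1 : 1 ≤ K := by exact_mod_cast hk
  set M := (PySem.List.max? (h :: t) (fun y => y)).getD 0 with hMdef
  by_cases hkn : (K : Int) ≤ ((h :: t).length : Int)
  · -- k ≤ n : compare with theta
    have hKL : K ≤ (h :: t).length := by exact_mod_cast hkn
    have hθM : theta (h :: t) K ≤ M := theta_le_max hK1 hKL
    have Hc : ∀ x, 1 ≤ x → x ≤ M →
        crossLoopA (K : Int) x (h :: t) 0 = decide (x ≤ theta (h :: t) K) := by
      intro x _ _
      by_cases hxθ : x ≤ theta (h :: t) K
      · rw [decide_eq_true hxθ]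
        rw [crossLoopA_true_iff K hK1, bad_iff_theta hK1 hKL]
        omega
      · rw [decide_eq_false hxθ]
        have : crossLoopA (K : Int) x (h :: t) 0 = false := by
          cases hc : crossLoopA (K : Int) x (h :: t) 0 with
          | false => rfl
          | true =>
            rw [crossLoopA_true_iff K hK1, bad_iff_theta hK1 hKL] at hc
            omega
        rw [this]
      -- x ranges over the binary-search midpoints; only x ≤ θ matters
    rw [solution, bsearch_eval (h :: t) (K : Int) (theta (h :: t) K) M Hc
      (M - 1 + 1).toNat 1 M 0 (by omega) le_rfl le_rfl]
    rw [alt_eq_theta (h :: t) K hK1 hKL]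
    split_ifs <;> omega
  · -- k > n : every mid is crossable, the search returns max(stones) clamped at 0
    have hKL : ¬ K ≤ (h :: t).length := by
      intro hc; apply hkn; exact_mod_cast hc
    have Hc : ∀ x, 1 ≤ x → x ≤ M →
        crossLoopA (K : Int) x (h :: t) 0 = decide (x ≤ M) := by
      intro x _ hxM
      rw [decide_eq_true hxM, crossLoopA_true_iff K hK1]
      rintro ⟨i, hi, _⟩
      omega
    rw [solution, bsearch_eval (h :: t) (K : Int) M M Hc
      (M - 1 + 1).toNat 1 M 0 (by omega) le_rfl le_rfl]
    rw [alt_eq_max (h :: t) (K : Int) (by exact_mod_cast hK1) (by omega)]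
    split_ifs <;> omega
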